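-- pv_equiv track=rewrite | github.com/wongsf/literate-invention | ai_implementations/simoniiAI.py | ternaryToDec
-- ===== SOURCE A (Python) =====
-- def ternaryToDec(peg):
--     temp = 0
--     digit = 0
--     while peg > 0:
--         q, mod = divmod(peg,10)
--         peg = q
--         temp = temp + mod * (3**digit)
--         digit = digit + 1
--     return temp
-- ===== SOURCE B (Python) =====
-- def ternaryToDec(peg):
--     # Recursive Horner: the decimal digits of peg, read most-significant first,
--     # are interpreted as a base-3 number.
--     if peg <= 0:
--         return 0
--     return ternaryToDec(peg // 10) * 3 + peg % 10
-- ===== Notes on version B (the rewrite author's own statement) =====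
-- stated objective: simpler
-- what changed: Replaced A's while-loop that accumulates mod*3**digit with an explicit power counter (LSB-first power sum) by a two-line recursive Horner evaluation value(peg) = value(peg//10)*3 + peg%10 with no power or counter state.
import Mathlib
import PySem

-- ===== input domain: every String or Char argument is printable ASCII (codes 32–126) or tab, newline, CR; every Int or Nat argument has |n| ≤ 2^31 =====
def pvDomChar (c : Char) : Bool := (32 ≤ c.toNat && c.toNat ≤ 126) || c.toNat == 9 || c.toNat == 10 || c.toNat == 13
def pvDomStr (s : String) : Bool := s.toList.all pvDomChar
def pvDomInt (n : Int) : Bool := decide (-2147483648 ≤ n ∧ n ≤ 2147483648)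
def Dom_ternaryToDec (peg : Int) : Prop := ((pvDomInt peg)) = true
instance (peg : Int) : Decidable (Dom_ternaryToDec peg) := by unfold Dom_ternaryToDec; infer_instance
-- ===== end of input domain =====

-- B replaces A's LSB-first power-sum while-loop by a two-line recursive Horner evaluation (simpler).


-- termination helper for both ports: peg // 10 strictly shrinks the natAbs measure when peg > 0
theorem pvFloordiv10_toNat_lt (peg : Int) (h : 0 < peg) :
    (PySem.Int.floordiv peg 10).toNat < peg.toNat := by
  rw [PySem.Int.floordiv_eq_ediv_of_pos (by norm_num : (0:Int) < 10)]
  omega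

-- ===== PORT A =====
-- while peg > 0: q, mod = divmod(peg,10); peg = q; temp += mod * 3**digit; digit += 1
def ternaryToDecGo (peg temp digit : Int) : Int :=
  if h : 0 < peg then
    ternaryToDecGo (PySem.Int.floordiv peg 10)
      (temp + PySem.Int.mod peg 10 * 3 ^ digit.toNat) (digit + 1)
  else temp
termination_by peg.toNat
decreasing_by exact pvFloordiv10_toNat_lt peg h

def ternaryToDec (peg : Int) : Int := ternaryToDecGo peg 0 0

-- ===== PORT B =====
def ternaryToDec_alt (peg : Int) : Int :=
  if h : peg ≤ 0 then 0
  else ternaryToDec_alt (PySem.Int.floordiv peg 10) * 3 + PySem.Int.mod peg 10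
termination_by peg.toNat
decreasing_by exact pvFloordiv10_toNat_lt peg (by omega)

-- ===== PRECONDITION & SPEC =====
def Spec_ternaryToDec (peg : Int) (out : Int) : Prop := out = ternaryToDec_alt peg
instance (peg : Int) (out : Int) : Decidable (Spec_ternaryToDec peg out) := by unfold Spec_ternaryToDec; infer_instance

-- ===== CLAIM (what is proved, stated in full; the proofs are below) =====
def Claim_equal_ternaryToDec : Prop := ∀ (peg : Int), Dom_ternaryToDec peg → Spec_ternaryToDec peg (ternaryToDec peg)

-- ===== LEMMAS AND PROOFS =====

-- loop invariant: A's accumulator loop computes temp + (Horner value of peg) * 3^digit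
theorem ternaryToDecGo_eq (n : Nat) : ∀ (peg temp digit : Int), peg.toNat ≤ n → 0 ≤ digit →
    ternaryToDecGo peg temp digit = temp + ternaryToDec_alt peg * 3 ^ digit.toNat := by
  induction n with
  | zero =>
    intro peg temp digit hle _
    have hpeg : ¬ 0 < peg := by omega
    have h2 : peg ≤ 0 := by omega
    rw [ternaryToDecGo, ternaryToDec_alt]
    simp [hpeg, h2]
  | succ n ih =>
    intro peg temp digit hle hd
    by_cases hpeg : 0 < peg
    · rw [ternaryToDecGo, ternaryToDec_alt]
      have h1 : ¬ peg ≤ 0 := by omega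
      simp only [hpeg, h1, dif_pos, dif_neg, not_false_iff]
      rw [ih _ _ _ (by have := pvFloordiv10_toNat_lt peg hpeg; omega) (by omega)]
      have : (digit + 1).toNat = digit.toNat + 1 := by omega
      rw [this, pow_succ]
      ring
    · have h2 : peg ≤ 0 := by omega
      rw [ternaryToDecGo, ternaryToDec_alt]
      simp [hpeg, h2]

-- ===== VERDICT (by name: the statement is the Claim_ definition above) =====
theorem ternaryToDec_spec : Claim_equal_ternaryToDec := by
  intro peg _
  unfold Spec_ternaryToDec ternaryToDec
  rw [ternaryToDecGo_eq peg.toNat peg 0 0 le_rfl le_rfl]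
  simp
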